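-- pv_equiv track=rewrite | github.com/AndreaG05/backup_newub | Algoritmi/misurazioni.py | check_consecutive_alert
-- ===== SOURCE A (Python) =====
-- def check_consecutive_alert(values, lower, upper, N):
--     count = 0
--     start_index = None
--
--     for i, val in enumerate(values):
--         if val < lower or val > upper:
--             if count == 0:
--                 start_index = i
--             count += 1
--             if count == N:
--                 return (True, start_index)
--         else:
--             count = 0
--             start_index = None
--     return (False, None)
-- ===== SOURCE B (Python) =====
-- from itertools import groupby
--
-- def check_consecutive_alert(values, lower, upper, N):
--     if N >= 1:
--         idx = 0
--         for bad, grp in groupby(values, key=lambda v: v < lower or v > upper):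
--             length = sum(1 for _ in grp)
--             if bad and length >= N:
--                 return (True, idx)
--             idx += length
--     return (False, None)
-- ===== Notes on version B (the rewrite author's own statement) =====
-- stated objective: idiomatic
-- what changed: Replaces the incremental counter/reset scan with an itertools.groupby run partition: the list is split into maximal runs of the out-of-range predicate and the first bad run of length >= N (with N >= 1 guarded once up front) yields its start index.
import Mathlib
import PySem

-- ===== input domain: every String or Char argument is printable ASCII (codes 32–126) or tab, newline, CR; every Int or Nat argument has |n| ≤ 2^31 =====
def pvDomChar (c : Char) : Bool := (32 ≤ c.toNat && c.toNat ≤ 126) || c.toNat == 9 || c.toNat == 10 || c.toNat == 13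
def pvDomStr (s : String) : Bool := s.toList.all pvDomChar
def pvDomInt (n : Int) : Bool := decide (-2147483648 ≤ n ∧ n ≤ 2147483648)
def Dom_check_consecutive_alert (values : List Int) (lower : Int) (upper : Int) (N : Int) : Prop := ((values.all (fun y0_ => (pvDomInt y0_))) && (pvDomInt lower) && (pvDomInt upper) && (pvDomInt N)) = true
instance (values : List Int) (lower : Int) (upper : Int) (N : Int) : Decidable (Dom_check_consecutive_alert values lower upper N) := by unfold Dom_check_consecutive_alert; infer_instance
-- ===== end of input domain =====

-- B replaces A's incremental counter/reset scan with a run-oriented (groupby-style) traversal over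
-- maximal runs of the out-of-range predicate; same O(n) cost, more idiomatic decomposition.


-- ===== PORT A =====
-- A's for-loop as structural recursion over the same state (i, count, start_index)
def pvGoA (lower upper N : Int) : List Int → Int → Int → Option Int → Bool × Option Int
  | [], _, _, _ => (false, none)
  | v :: rest, i, count, start =>
    if v < lower ∨ v > upper then
      let start' := if count = 0 then some i else start
      if count + 1 = N then (true, start')
      else pvGoA lower upper N rest (i + 1) (count + 1) start'
    else pvGoA lower upper N rest (i + 1) 0 none

def check_consecutive_alert (values : List Int) (lower : Int) (upper : Int) (N : Int) : Bool × Option Int :=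
  pvGoA lower upper N values 0 0 none

-- ===== PORT B =====
-- Source B's groupby loop: peel one maximal run of equal out-of-range flag per step,
-- return (true, run start) at the first bad run of length ≥ N; idx tracks the run start.
def pvBad (lower upper v : Int) : Bool := decide (v < lower) || decide (v > upper)

def pvGoB (lower upper N : Int) : List Int → Int → Bool × Option Int
  | [], _ => (false, none)
  | v :: rest, idx =>
    let bad := pvBad lower upper v
    let tail := rest.takeWhile (fun w => pvBad lower upper w == bad)
    if bad ∧ N ≤ 1 + (tail.length : Int) then (true, some idx)
    else pvGoB lower upper N (rest.dropWhile (fun w => pvBad lower upper w == bad)) (idx + 1 + tail.length)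
termination_by l => l.length
decreasing_by
  simpa using Nat.lt_succ_of_le (List.length_dropWhile_le _ _)

def check_consecutive_alert_alt (values : List Int) (lower : Int) (upper : Int) (N : Int) : Bool × Option Int :=
  if 1 ≤ N then pvGoB lower upper N values 0 else (false, none)

-- ===== PRECONDITION & SPEC =====
def Spec_check_consecutive_alert (values : List Int) (lower : Int) (upper : Int) (N : Int) (out : Bool × Option Int) : Prop := out = check_consecutive_alert_alt values lower upper N
instance (values : List Int) (lower : Int) (upper : Int) (N : Int) (out : Bool × Option Int) : Decidable (Spec_check_consecutive_alert values lower upper N out) := by unfold Spec_check_consecutive_alert; infer_instance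

-- ===== CLAIM (what is proved, stated in full; the proofs are below) =====
def Claim_equal_check_consecutive_alert : Prop := ∀ (values : List Int) (lower : Int) (upper : Int) (N : Int), Dom_check_consecutive_alert values lower upper N → Spec_check_consecutive_alert values lower upper N (check_consecutive_alert values lower upper N)

-- ===== LEMMAS AND PROOFS =====

-- A never fires when N ≤ 0: the incremented count is ≥ 1 > N at every check
lemma pvGoA_nonpos (lower upper N : Int) (hN : N ≤ 0) :
    ∀ (l : List Int) (i c : Int) (s : Option Int), 0 ≤ c →
      pvGoA lower upper N l i c s = (false, none) := by
  intro l
  induction l with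
  | nil => intro i c s _; rfl
  | cons v rest ih =>
    intro i c s hc
    simp only [pvGoA]
    by_cases hb : v < lower ∨ v > upper
    · rw [if_pos hb, if_neg (by omega : ¬ c + 1 = N)]
      exact ih _ _ _ (by omega)
    · rw [if_neg hb]
      exact ih _ _ _ le_rfl

-- A with a good head (or no input left) resets state: incoming count/start are irrelevant
lemma pvGoA_reset (lower upper N : Int) (l : List Int) (i c : Int) (s : Option Int)
    (hgood : l = [] ∨ ∃ v rest, l = v :: rest ∧ pvBad lower upper v = false) :
    pvGoA lower upper N l i c s = pvGoA lower upper N l i 0 none := by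
  rcases hgood with h | ⟨v, rest, rfl, hv⟩
  · subst h; rfl
  · have hb : ¬ (v < lower ∨ v > upper) := by
      simpa [pvBad, decide_eq_false_iff_not, not_or] using hv
    simp only [pvGoA, if_neg hb]

-- A consumes a bad run that started earlier (count c > 0, start already fixed at s)
lemma pvGoA_bad_gen (lower upper N : Int) :
    ∀ (t : List Int) (rest : List Int) (i c : Int) (s : Option Int),
      0 < c → c < N → (∀ x ∈ t, pvBad lower upper x = true) →
      pvGoA lower upper N (t ++ rest) i c s =
        if N ≤ c + (t.length : Int) then (true, s)
        else pvGoA lower upper N rest (i + t.length) (c + t.length) s := by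
  intro t
  induction t with
  | nil =>
    intro rest i c s hc hcN _
    simp only [List.nil_append, List.length_nil]
    rw [if_neg (by omega)]
    norm_num
  | cons v t' ih =>
    intro rest i c s hc hcN hall
    have hv : pvBad lower upper v = true := hall v (List.mem_cons_self ..)
    have hb : v < lower ∨ v > upper := by
      simpa [pvBad, decide_eq_true_eq] using hv
    simp only [List.cons_append, pvGoA, if_pos hb]
    rw [if_neg (by omega : ¬ c = 0)]
    have hcast : (((v :: t').length : Nat) : Int) = (t'.length : Int) + 1 := by
      push_cast [List.length_cons]; ring
    by_cases hEq : c + 1 = N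
    · rw [if_pos hEq, if_pos (by rw [hcast]; omega)]
    · rw [if_neg hEq,
        ih rest (i + 1) (c + 1) s (by omega) (by omega)
          (fun x hx => hall x (List.mem_cons_of_mem _ hx))]
      by_cases hle : N ≤ c + 1 + (t'.length : Int)
      · rw [if_pos hle, if_pos (by rw [hcast]; omega)]
      · rw [if_neg hle, if_neg (by rw [hcast]; omega)]
        rw [hcast]
        congr 1 <;> ring

-- A skips a run of in-range values
lemma pvGoA_good (lower upper N : Int) :
    ∀ (t : List Int) (rest : List Int) (i : Int),
      (∀ x ∈ t, pvBad lower upper x = false) →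
      pvGoA lower upper N (t ++ rest) i 0 none =
        pvGoA lower upper N rest (i + t.length) 0 none := by
  intro t
  induction t with
  | nil => intro rest i _; simp
  | cons v t' ih =>
    intro rest i hall
    have hb : ¬ (v < lower ∨ v > upper) := by
      simpa [pvBad, decide_eq_false_iff_not, not_or] using
        hall v (List.mem_cons_self ..)
    simp only [List.cons_append, pvGoA, if_neg hb]
    rw [ih rest (i + 1) (fun x hx => hall x (List.mem_cons_of_mem _ hx))]
    congr 1
    push_cast [List.length_cons]
    ring

-- the head of dropWhile (if any) falsifies the predicate
lemma dropWhile_head_prop {α : Type} (p : α → Bool) (l : List α) :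
    l.dropWhile p = [] ∨ ∃ v rest, l.dropWhile p = v :: rest ∧ p v = false := by
  induction l with
  | nil => exact Or.inl rfl
  | cons a l ih =>
    by_cases hp : p a = true
    · rw [List.dropWhile_cons_of_pos hp]
      exact ih
    · rw [List.dropWhile_cons_of_neg hp]
      exact Or.inr ⟨a, l, rfl, by simpa using hp⟩

-- main equivalence for N ≥ 1, by strong induction on the list length
lemma pvGo_main (lower upper N : Int) (hN : 1 ≤ N) :
    ∀ (n : Nat) (l : List Int), l.length ≤ n → ∀ (i : Int),
      pvGoA lower upper N l i 0 none = pvGoB lower upper N l i := by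
  intro n
  induction n with
  | zero =>
    intro l hl i
    have : l = [] := List.eq_nil_of_length_eq_zero (Nat.le_zero.mp hl)
    subst this
    simp [pvGoA, pvGoB]
  | succ n ih =>
    intro l hl i
    match l with
    | [] => simp [pvGoA, pvGoB]
    | v :: rest =>
      by_cases hv : pvBad lower upper v = true
      · -- bad run: v :: takeWhile bad rest
        have hb : v < lower ∨ v > upper := by
          simpa [pvBad, decide_eq_true_eq] using hv
        set p := fun w => pvBad lower upper w == true with hp
        set t' := rest.takeWhile p with ht'
        set r' := rest.dropWhile p with hr'
        have hsplit : rest = t' ++ r' := (List.takeWhile_append_dropWhile).symm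
        have htall : ∀ x ∈ t', pvBad lower upper x = true := by
          intro x hx
          have := List.mem_takeWhile_imp hx
          simpa [hp] using this
        have hrhead' : r' = [] ∨ ∃ w rr, r' = w :: rr ∧ pvBad lower upper w = false := by
          rcases dropWhile_head_prop p rest with h | ⟨w, rr, hw, hpw⟩
          · exact Or.inl h
          · exact Or.inr ⟨w, rr, hw, by simpa [hp] using hpw⟩
        -- unfold B one step
        rw [pvGoB]
        simp only [hv, ← hp, ← ht', ← hr']
        -- unfold A one step
        have hc : v :: rest = v :: (t' ++ r') := by rw [← hsplit]
        rw [hc]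
        simp only [pvGoA, if_pos hb, if_true]
        by_cases h1 : (0:Int) + 1 = N
        · rw [if_pos h1, if_pos ⟨trivial, by omega⟩]
        · rw [if_neg h1,
            pvGoA_bad_gen lower upper N t' r' (i + 1) (0 + 1) (some i) (by omega) (by omega) htall]
          by_cases hle : N ≤ 1 + (t'.length : Int)
          · rw [if_pos (by omega), if_pos ⟨trivial, hle⟩]
          · rw [if_neg (by omega), if_neg (by rintro ⟨-, h⟩; omega)]
            rw [pvGoA_reset lower upper N r' _ _ _ hrhead']
            have hlen : r'.length ≤ n := by
              have h1l : r'.length ≤ rest.length := hr' ▸ List.length_dropWhile_le _ _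
              have h2l : rest.length ≤ n := by
                simpa using Nat.succ_le_succ_iff.mp (by simpa using hl)
              omega
            exact ih r' hlen (i + 1 + t'.length)
      · -- good run: v :: takeWhile good rest
        have hv' : pvBad lower upper v = false := by
          simpa using hv
        set p := fun w => pvBad lower upper w == false with hp
        set t' := rest.takeWhile p with ht'
        set r' := rest.dropWhile p with hr'
        have hsplit : rest = t' ++ r' := (List.takeWhile_append_dropWhile).symm
        have htall : ∀ x ∈ (v :: t'), pvBad lower upper x = false := by
          intro x hx
          rcases List.mem_cons.mp hx with rfl | hx
          · exact hv'
          · have := List.mem_takeWhile_imp hx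
            simpa [hp] using this
        rw [pvGoB]
        simp only [hv', ← hp, ← ht', ← hr']
        rw [if_neg (by simp)]
        have hc : v :: rest = (v :: t') ++ r' := by
          rw [List.cons_append, ← hsplit]
        rw [hc, pvGoA_good lower upper N (v :: t') r' i htall,
          show i + (((v :: t').length : Nat) : Int) = i + 1 + t'.length by
            push_cast [List.length_cons]; ring]
        have hlen : r'.length ≤ n := by
          have h1l : r'.length ≤ rest.length := hr' ▸ List.length_dropWhile_le _ _
          have h2l : rest.length ≤ n := by
            simpa using Nat.succ_le_succ_iff.mp (by simpa using hl)
          omega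
        exact ih r' hlen (i + 1 + t'.length)

-- ===== VERDICT (by name: the statement is the Claim_ definition above) =====
theorem check_consecutive_alert_spec : Claim_equal_check_consecutive_alert := by
  intro values lower upper N _
  unfold Spec_check_consecutive_alert check_consecutive_alert check_consecutive_alert_alt
  by_cases hN : 1 ≤ N
  · rw [if_pos hN]
    exact pvGo_main lower upper N hN values.length values le_rfl 0
  · rw [if_neg hN]
    exact pvGoA_nonpos lower upper N (by omega) values 0 0 none le_rfl
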